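-- pv_equiv track=rewrite | github.com/H1mm4tHQ/Speech-Understanding | B22EE033/Q2/train.py | build_split
-- ===== SOURCE A (Python) =====
-- from collections import Counter, defaultdict
--
-- def build_split(items, speakers, max_per_speaker, start_idx=0):
--     grouped = defaultdict(list)
--     for item in items:
--         if item["speaker_id"] in speakers:
--             grouped[item["speaker_id"]].append(item)
--     out = []
--     for spk in speakers:
--         spk_items = sorted(grouped[spk], key=lambda x: x["path"])
--         out.extend(spk_items[start_idx:start_idx + max_per_speaker])
--     return out
-- ===== SOURCE B (Python) =====
-- def build_split(items, speakers, max_per_speaker, start_idx=0):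
--     def take(spk):
--         spk_items = sorted([it for it in items if it["speaker_id"] == spk],
--                            key=lambda x: x["path"])
--         return spk_items[start_idx:start_idx + max_per_speaker]
--     return [it for spk in speakers for it in take(spk)]
-- ===== Notes on version B (the rewrite author's own statement) =====
-- stated objective: simpler
-- what changed: Drops the defaultdict grouping pass: instead of building a speaker-indexed dict first, B selects each speaker's items by a direct scan-filter of items per speaker and flattens the sliced, path-sorted groups.
import Mathlib
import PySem

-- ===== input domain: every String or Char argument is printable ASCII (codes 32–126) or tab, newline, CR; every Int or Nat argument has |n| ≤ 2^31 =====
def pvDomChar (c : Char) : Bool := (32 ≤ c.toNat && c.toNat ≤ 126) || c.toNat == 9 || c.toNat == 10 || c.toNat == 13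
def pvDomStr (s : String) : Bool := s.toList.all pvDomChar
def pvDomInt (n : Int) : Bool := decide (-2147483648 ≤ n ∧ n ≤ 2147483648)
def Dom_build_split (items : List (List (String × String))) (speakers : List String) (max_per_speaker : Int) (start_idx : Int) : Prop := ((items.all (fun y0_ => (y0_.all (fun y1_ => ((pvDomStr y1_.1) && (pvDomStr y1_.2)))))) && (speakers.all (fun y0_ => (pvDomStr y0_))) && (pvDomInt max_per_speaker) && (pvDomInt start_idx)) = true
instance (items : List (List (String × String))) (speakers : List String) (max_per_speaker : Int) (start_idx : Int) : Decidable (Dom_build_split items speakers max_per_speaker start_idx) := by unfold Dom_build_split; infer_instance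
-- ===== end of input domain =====

-- B drops A's defaultdict grouping pass: a direct scan-filter-sort-slice per speaker, flattened; same return value, no speed claim.

-- ===== PORT A =====
-- item["speaker_id"] / item["path"]: first-match lookup in the item's association list (dict).
-- Under Pre_ the key is present; the "" default is never read there.
def pvSid (it : List (String × String)) : String := ((PySem.Dict.mk it).get? "speaker_id").getD ""
def pvPath (it : List (String × String)) : String := ((PySem.Dict.mk it).get? "path").getD ""

def build_split (items : List (List (String × String))) (speakers : List String) (max_per_speaker : Int) (start_idx : Int) : List (List (String × String)) :=
  let grouped : PySem.Dict String (List (List (String × String))) :=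
    items.foldl (fun d item =>
      if speakers.contains (pvSid item) then d.modify (pvSid item) [] (· ++ [item]) else d)
      PySem.Dict.empty
  speakers.foldl (fun out spk =>
    out ++ PySem.List.slice (PySem.List.sorted (grouped.getD spk []) pvPath false)
            (some start_idx) (some (start_idx + max_per_speaker))) []

-- ===== PORT B =====
def build_split_alt (items : List (List (String × String))) (speakers : List String) (max_per_speaker : Int) (start_idx : Int) : List (List (String × String)) :=
  speakers.flatMap (fun spk =>
    PySem.List.slice (PySem.List.sorted (items.filter (fun it => pvSid it == spk)) pvPath false)
      (some start_idx) (some (start_idx + max_per_speaker)))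

-- ===== PRECONDITION & SPEC =====
-- Pre_ excludes exactly the inputs where Python A raises KeyError: an item without a
-- "speaker_id" key, or an item grouped under a requested speaker without a "path" key.
def Pre_build_split (items : List (List (String × String))) (speakers : List String) (max_per_speaker : Int) (start_idx : Int) : Prop :=
  items.all (fun it => (PySem.Dict.mk it).contains "speaker_id"
    && (!(speakers.contains (pvSid it)) || (PySem.Dict.mk it).contains "path")) = true
instance (items : List (List (String × String))) (speakers : List String) (max_per_speaker : Int) (start_idx : Int) : Decidable (Pre_build_split items speakers max_per_speaker start_idx) := by unfold Pre_build_split; infer_instance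
def pvWitness_build_split : (List (List (String × String))) × List String × Int × Int :=
  ([[("speaker_id", "s1"), ("path", "p")], [("speaker_id", "s2"), ("path", "q")]], ["s1", "s2"], 1, 0)

def Spec_build_split (items : List (List (String × String))) (speakers : List String) (max_per_speaker : Int) (start_idx : Int) (out : List (List (String × String))) : Prop := out = build_split_alt items speakers max_per_speaker start_idx
instance (items : List (List (String × String))) (speakers : List String) (max_per_speaker : Int) (start_idx : Int) (out : List (List (String × String))) : Decidable (Spec_build_split items speakers max_per_speaker start_idx out) := by unfold Spec_build_split; infer_instance

-- ===== CLAIM (what is proved, stated in full; the proofs are below) =====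
def Claim_equal_build_split : Prop := ∀ (items : List (List (String × String))) (speakers : List String) (max_per_speaker : Int) (start_idx : Int), Dom_build_split items speakers max_per_speaker start_idx → Pre_build_split items speakers max_per_speaker start_idx → Spec_build_split items speakers max_per_speaker start_idx (build_split items speakers max_per_speaker start_idx)

-- ===== LEMMAS AND PROOFS =====

-- A's grouping loop, read back: for any requested speaker, the dict entry built by the
-- guarded modify-append fold is exactly the scan-filter of the item list.
lemma grouped_getD (speakers : List String) (items : List (List (String × String)))
    (d : PySem.Dict String (List (List (String × String)))) (spk : String)
    (hspk : speakers.contains spk = true) :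
    (items.foldl (fun d item =>
        if speakers.contains (pvSid item) then d.modify (pvSid item) [] (· ++ [item]) else d) d).getD spk []
      = d.getD spk [] ++ items.filter (fun it => pvSid it == spk) := by
  induction items generalizing d with
  | nil => simp
  | cons item rest ih =>
    simp only [List.foldl_cons, List.filter_cons]
    by_cases h : pvSid item = spk
    · subst h
      rw [hspk]
      simp only [beq_self_eq_true, if_pos]
      rw [ih, PySem.Dict.getD_modify_self]
      simp
    · have hb : (pvSid item == spk) = false := by simp [h]
      simp only [hb, Bool.false_eq_true, if_false]
      by_cases hc : speakers.contains (pvSid item) = true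
      · rw [hc]
        simp only [if_pos]
        rw [ih, PySem.Dict.getD_modify_of_ne _ _ _ (Ne.symm h)]
      · simp only [Bool.not_eq_true] at hc
        rw [hc]
        simp only [Bool.false_eq_true, if_neg, not_false_iff]
        exact ih d

theorem build_split_spec : Claim_equal_build_split := by
  intro items speakers mps si _ _
  unfold Spec_build_split build_split build_split_alt
  rw [PySem.List.foldl_append_eq_flatMap]
  simp only [List.nil_append]
  refine List.flatMap_congr ?_
  intro spk hspk
  rw [grouped_getD speakers items PySem.Dict.empty spk
        (by simpa [List.contains_iff_mem] using hspk),
      PySem.Dict.getD_empty, List.nil_append]
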